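-- pv_equiv track=rewrite | github.com/kevinov07/linja-game-IA | Model/Game.py | obtain_info_square
-- ===== SOURCE A (Python) =====
-- def obtain_info_square(state, col):
--
--     rows = len(state)
--     count_red_pieces = 0
--     count_black_pieces = 0
--     distribution_pieces = []
--
--     for row in range(rows):
--         piece = state[row][col]
--         if piece == "1":
--             count_red_pieces += 1
--         elif piece == "2":
--             count_black_pieces += 1
--
--         distribution_pieces.append(piece)
--
--     return count_red_pieces, count_black_pieces, distribution_pieces
-- ===== SOURCE B (Python) =====
-- def obtain_info_square(state, col):
--     distribution_pieces = [row[col] for row in state]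
--     return (distribution_pieces.count("1"),
--             distribution_pieces.count("2"),
--             distribution_pieces)
-- ===== Notes on version B (the rewrite author's own statement) =====
-- stated objective: simpler
-- what changed: Replaces the single index-driven loop that threads two counters and an accumulator list with a build pass (comprehension over the rows, no index arithmetic) followed by two .count() scans over the built column.
import Mathlib
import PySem

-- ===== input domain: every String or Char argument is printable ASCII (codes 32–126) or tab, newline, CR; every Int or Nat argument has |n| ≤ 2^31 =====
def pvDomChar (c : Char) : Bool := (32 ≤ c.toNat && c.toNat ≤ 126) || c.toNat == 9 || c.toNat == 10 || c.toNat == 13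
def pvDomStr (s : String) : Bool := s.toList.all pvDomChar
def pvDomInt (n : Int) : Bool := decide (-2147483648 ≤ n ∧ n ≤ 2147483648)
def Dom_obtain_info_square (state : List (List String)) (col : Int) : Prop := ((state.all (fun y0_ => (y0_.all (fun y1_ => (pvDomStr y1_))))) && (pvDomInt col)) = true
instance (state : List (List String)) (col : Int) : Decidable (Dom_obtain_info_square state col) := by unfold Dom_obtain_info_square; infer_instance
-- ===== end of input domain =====

-- B builds the column list in one comprehension pass and then counts "1"s and "2"s with two .count scans,
-- instead of A's single index-driven loop threading two counters and an accumulator list. Same return value on Pre_.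

-- ===== PORT A =====
def obtain_info_square (state : List (List String)) (col : Int) : Int × Int × List String :=
  let rows : Int := state.length
  (PySem.List.pyRange 0 rows 1).foldl
    (fun (acc : Int × Int × List String) row =>
      -- piece = state[row][col]; pyGetD is exact here: row is always in range, col is in range by Pre_
      let piece := PySem.List.pyGetD (PySem.List.pyGetD state row []) col ""
      if piece = "1" then (acc.1 + 1, acc.2.1, acc.2.2 ++ [piece])
      else if piece = "2" then (acc.1, acc.2.1 + 1, acc.2.2 ++ [piece])
      else (acc.1, acc.2.1, acc.2.2 ++ [piece]))
    (0, 0, [])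

-- ===== PORT B =====
def obtain_info_square_alt (state : List (List String)) (col : Int) : Int × Int × List String :=
  let distribution_pieces := state.map (fun row => PySem.List.pyGetD row col "")
  (PySem.List.count distribution_pieces "1",
   PySem.List.count distribution_pieces "2",
   distribution_pieces)

-- ===== PRECONDITION & SPEC =====
-- Pre_ excludes exactly the inputs where Python A raises IndexError: a row in which col is not a valid index.
def Pre_obtain_info_square (state : List (List String)) (col : Int) : Prop :=
  ∀ row ∈ state, PySem.Raise.InRange row.length col
instance (state : List (List String)) (col : Int) : Decidable (Pre_obtain_info_square state col) := by unfold Pre_obtain_info_square; infer_instance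

def pvWitness_obtain_info_square : List (List String) × Int := ([["1", "2"], ["2", "0"]], 0)

def Spec_obtain_info_square (state : List (List String)) (col : Int) (out : Int × Int × List String) : Prop := out = obtain_info_square_alt state col
instance (state : List (List String)) (col : Int) (out : Int × Int × List String) : Decidable (Spec_obtain_info_square state col out) := by unfold Spec_obtain_info_square; infer_instance

-- ===== CLAIM (what is proved, stated in full; the proofs are below) =====
def Claim_equal_obtain_info_square : Prop := ∀ (state : List (List String)) (col : Int), Dom_obtain_info_square state col → Pre_obtain_info_square state col → Spec_obtain_info_square state col (obtain_info_square state col)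

-- ===== LEMMAS AND PROOFS =====

-- A's loop, rephrased as a fold over the rows themselves, computes B's triple shifted by the accumulator.
theorem obtain_info_square_loop (state : List (List String)) (col : Int)
    (r b : Int) (d : List String) :
    state.foldl
      (fun (acc : Int × Int × List String) row =>
        let piece := PySem.List.pyGetD row col ""
        if piece = "1" then (acc.1 + 1, acc.2.1, acc.2.2 ++ [piece])
        else if piece = "2" then (acc.1, acc.2.1 + 1, acc.2.2 ++ [piece])
        else (acc.1, acc.2.1, acc.2.2 ++ [piece]))
      (r, b, d)
    = (r + PySem.List.count (state.map (fun row => PySem.List.pyGetD row col "")) "1",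
       b + PySem.List.count (state.map (fun row => PySem.List.pyGetD row col "")) "2",
       d ++ state.map (fun row => PySem.List.pyGetD row col "")) := by
  induction state generalizing r b d with
  | nil => simp [PySem.List.count]
  | cons x xs ih =>
    simp only [List.foldl_cons, List.map_cons]
    split_ifs with h1 h2 <;>
      simp_all [PySem.List.count] <;>
      omega

-- ===== VERDICT (by name: the statement is the Claim_ definition above) =====
theorem obtain_info_square_spec : Claim_equal_obtain_info_square := by
  intro state col _ _
  show _ = _
  unfold obtain_info_square obtain_info_square_alt
  simp only []
  rw [PySem.List.foldl_pyRange_zero_pyGetD' state []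
      (fun (acc : Int × Int × List String) row =>
        let piece := PySem.List.pyGetD row col ""
        if piece = "1" then (acc.1 + 1, acc.2.1, acc.2.2 ++ [piece])
        else if piece = "2" then (acc.1, acc.2.1 + 1, acc.2.2 ++ [piece])
        else (acc.1, acc.2.1, acc.2.2 ++ [piece])) (0, 0, [])]
  simp [obtain_info_square_loop]
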